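-- pv_equiv track=rewrite | github.com/arockiaraj1994/dev-agent-playbook | mcp/metrics.py | _extract_project_from_args
-- ===== SOURCE A (Python) =====
-- def _extract_project_from_args(args_summary: str) -> str | None:
--     """args_summary is a short JSON-ish string; try to parse `project=...`."""
--     if not args_summary:
--         return None
--     needle = "project="
--     idx = args_summary.find(needle)
--     if idx < 0:
--         return None
--     rest = args_summary[idx + len(needle) :]
--     end = 0
--     for ch in rest:
--         if ch in (",", " ", "}", ")"):
--             break
--         end += 1
--     return rest[:end].strip("'\"") or None
-- ===== SOURCE B (Python) =====
-- def _extract_project_from_args(args_summary: str) -> str | None: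
--     """Locate `project=` once, then bound the value by the minimum of the
--     per-delimiter find positions instead of scanning char by char."""
--     pos = args_summary.find("project=")
--     if pos == -1:
--         return None
--     rest = args_summary[pos + 8:]
--     end = len(rest)
--     for d in (",", " ", "}", ")"):
--         i = rest.find(d)
--         if i != -1:
--             end = min(end, i)
--     return rest[:end].strip("'\"") or None
-- ===== Notes on version B (the rewrite author's own statement) =====
-- stated objective: alternative
-- what changed: A scans the value character by character with a break on a 4-way membership test; B instead computes each delimiter's first position with str.find and takes the minimum, slicing once.
import Mathlib
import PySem

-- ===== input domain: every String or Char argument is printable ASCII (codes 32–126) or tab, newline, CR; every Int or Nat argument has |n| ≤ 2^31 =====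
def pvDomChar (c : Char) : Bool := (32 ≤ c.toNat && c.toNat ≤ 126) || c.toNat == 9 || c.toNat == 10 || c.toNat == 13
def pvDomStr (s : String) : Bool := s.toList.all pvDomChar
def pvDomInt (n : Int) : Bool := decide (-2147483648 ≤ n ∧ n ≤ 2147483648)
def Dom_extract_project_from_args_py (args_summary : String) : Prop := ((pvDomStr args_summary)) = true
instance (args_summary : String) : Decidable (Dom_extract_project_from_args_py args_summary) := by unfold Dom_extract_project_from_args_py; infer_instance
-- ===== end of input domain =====

-- B replaces A's per-character scan-with-break by per-delimiter find positions combined with min (objective: alternative, same cost).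

-- ===== PORT A =====
-- the for/break loop counting the prefix before the first delimiter
def pvScanEnd (l : List Char) : Nat :=
  match l with
  | [] => 0
  | ch :: t => if ch = ',' ∨ ch = ' ' ∨ ch = '}' ∨ ch = ')' then 0 else pvScanEnd t + 1

def extract_project_from_args_py (args_summary : String) : Option String :=
  if args_summary = "" then none
  else
    let idx := PySem.Str.find args_summary "project="
    if idx < 0 then none
    else
      let rest := PySem.Str.slice args_summary (some (idx + PySem.Str.len "project=")) none
      let endv := pvScanEnd rest.toList
      let token := PySem.Str.stripChars (PySem.Str.slice rest none (some (endv : Int))) "'\""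
      if token = "" then none else some token

-- ===== PORT B =====
def extract_project_from_args_py_alt (args_summary : String) : Option String :=
  let pos := PySem.Str.find args_summary "project="
  if pos = -1 then none
  else
    let rest := PySem.Str.slice args_summary (some (pos + 8)) none
    let endv := [",", " ", "}", ")"].foldl (fun e d =>
      let i := PySem.Str.find rest d
      if i ≠ -1 then min e i else e) (PySem.Str.len rest)
    let token := PySem.Str.stripChars (PySem.Str.slice rest none (some endv)) "'\""
    if token = "" then none else some token

-- ===== PRECONDITION & SPEC =====
def Spec_extract_project_from_args_py (args_summary : String) (out : Option String) : Prop := out = extract_project_from_args_py_alt args_summary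
instance (args_summary : String) (out : Option String) : Decidable (Spec_extract_project_from_args_py args_summary out) := by unfold Spec_extract_project_from_args_py; infer_instance

-- ===== CLAIM (what is proved, stated in full; the proofs are below) =====
def Claim_equal_extract_project_from_args_py : Prop := ∀ (args_summary : String), Dom_extract_project_from_args_py args_summary → Spec_extract_project_from_args_py args_summary (extract_project_from_args_py args_summary)

-- ===== LEMMAS AND PROOFS =====

-- find.go either fails or returns an index ≥ its accumulator
theorem pv_go_lb (sub : List Char) (l : List Char) : ∀ k : Nat,
    PySem.Chars.find.go sub l k = -1 ∨ (k : Int) ≤ PySem.Chars.find.go sub l k := by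
  induction l with
  | nil =>
    intro k
    simp only [PySem.Chars.find.go]
    split_ifs <;> simp
  | cons c t ih =>
    intro k
    simp only [PySem.Chars.find.go]
    split_ifs with h
    · right; exact le_refl _
    · rcases ih (k + 1) with h1 | h1
      · left; exact h1
      · right; exact le_trans (by exact_mod_cast Nat.le_succ k) h1

theorem pv_find_lb (s sub : List Char) :
    PySem.Chars.find s sub = -1 ∨ 0 ≤ PySem.Chars.find s sub := by
  simpa using pv_go_lb sub s 0

-- shifting the accumulator of find.go
theorem pv_go_succ (sub : List Char) (l : List Char) : ∀ k : Nat,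
    PySem.Chars.find.go sub l (k + 1) =
      if PySem.Chars.find.go sub l k = -1 then -1 else PySem.Chars.find.go sub l k + 1 := by
  induction l with
  | nil =>
    intro k
    simp only [PySem.Chars.find.go]
    by_cases hs : sub.isEmpty
    · simp only [hs, if_pos]
      have : ¬ ((k : Int) = -1) := by omega
      rw [if_neg this]
      push_cast; ring
    · simp [hs]
  | cons c t ih =>
    intro k
    simp only [PySem.Chars.find.go]
    by_cases hp : sub.isPrefixOf (c :: t)
    · simp only [hp, if_pos]
      have : ¬ ((k : Int) = -1) := by omega
      rw [if_neg this]
      push_cast; ring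
    · simp only [hp, Bool.false_eq_true, if_false]
      exact ih (k + 1)

theorem pv_find_cons_single (c d : Char) (t : List Char) :
    PySem.Chars.find (c :: t) [d] =
      if c = d then 0
      else if PySem.Chars.find t [d] = -1 then -1 else PySem.Chars.find t [d] + 1 := by
  have key : PySem.Chars.find (c :: t) [d] =
      if [d].isPrefixOf (c :: t) then (0 : Int) else PySem.Chars.find.go [d] t 1 := by
    show PySem.Chars.find.go [d] (c :: t) 0 = _
    simp only [PySem.Chars.find.go]
    norm_num
  rw [key]
  by_cases h : c = d
  · subst h
    simp [List.isPrefixOf]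
  · have hp : [d].isPrefixOf (c :: t) = false := by
      simp only [List.isPrefixOf, Bool.and_eq_false_iff, beq_eq_false_iff_ne]
      left
      exact fun e => h e.symm
    rw [hp]
    simp only [Bool.false_eq_true, if_false, if_neg h]
    have h01 : (1 : Nat) = 0 + 1 := rfl
    rw [h01, pv_go_succ [d] t 0]
    rfl

theorem pv_find_nil_single (d : Char) : PySem.Chars.find ([] : List Char) [d] = -1 := by
  simp [PySem.Chars.find, PySem.Chars.find.go]

-- B's loop step, at the Chars level
def pvCStep (l : List Char) (e : Int) (d : Char) : Int :=
  if PySem.Chars.find l [d] ≠ -1 then min e (PySem.Chars.find l [d]) else e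

theorem pv_cstep_nil (e : Int) (d : Char) : pvCStep [] e d = e := by
  simp [pvCStep, pv_find_nil_single]

theorem pv_cstep_zero (l : List Char) (d : Char) : pvCStep l 0 d = 0 := by
  unfold pvCStep
  rcases pv_find_lb l [d] with h | h
  · simp [h]
  · split_ifs with h2
    · omega
    · rfl

theorem pv_cstep_nonneg (l : List Char) (e : Int) (d : Char) (he : 0 ≤ e) :
    0 ≤ pvCStep l e d := by
  unfold pvCStep
  rcases pv_find_lb l [d] with h | h
  · simp [h, he]
  · split_ifs with h2
    · omega
    · exact he

theorem pv_cstep_hit (t : List Char) (e : Int) (d : Char) (he : 0 ≤ e) :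
    pvCStep (d :: t) e d = 0 := by
  unfold pvCStep
  rw [pv_find_cons_single]
  simp [min_eq_right he]

theorem pv_cstep_shift (t : List Char) (e : Int) (c d : Char) (h : c ≠ d) :
    pvCStep (c :: t) (e + 1) d = pvCStep t e d + 1 := by
  unfold pvCStep
  rw [pv_find_cons_single, if_neg h]
  rcases pv_find_lb t [d] with hf | hf
  · simp [hf]
  · have hne : PySem.Chars.find t [d] ≠ -1 := by omega
    simp only [hne, ite_not]
    split_ifs with h2 h3
    · omega
    · omega
    · omega
    · omega

-- the folded B loop equals A's scan counter
def pvE (l : List Char) : Int :=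
  pvCStep l (pvCStep l (pvCStep l (pvCStep l (l.length : Int) ',') ' ') '}') ')'

theorem pvE_eq_scanEnd (l : List Char) : pvE l = (pvScanEnd l : Int) := by
  induction l with
  | nil => simp [pvE, pv_cstep_nil, pvScanEnd]
  | cons c t ih =>
    by_cases hdelim : c = ',' ∨ c = ' ' ∨ c = '}' ∨ c = ')'
    · have hz : pvScanEnd (c :: t) = 0 := by
        unfold pvScanEnd; simp [hdelim]
      rw [hz]
      unfold pvE
      have hlen : (0 : Int) ≤ ((c :: t).length : Int) := by positivity
      rcases hdelim with h | h | h | h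
      · subst h
        rw [pv_cstep_hit _ _ _ hlen, pv_cstep_zero, pv_cstep_zero, pv_cstep_zero]
        simp
      · subst h
        rw [pv_cstep_hit _ _ _ (pv_cstep_nonneg _ _ _ hlen), pv_cstep_zero, pv_cstep_zero]
        simp
      · subst h
        rw [pv_cstep_hit _ _ _ (pv_cstep_nonneg _ _ _ (pv_cstep_nonneg _ _ _ hlen)),
          pv_cstep_zero]
        simp
      · subst h
        rw [pv_cstep_hit _ _ _
          (pv_cstep_nonneg _ _ _ (pv_cstep_nonneg _ _ _ (pv_cstep_nonneg _ _ _ hlen)))]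
        simp
    · push_neg at hdelim
      obtain ⟨h1, h2, h3, h4⟩ := hdelim
      have hs : pvScanEnd (c :: t) = pvScanEnd t + 1 := by
        simp only [pvScanEnd]
        rw [if_neg (by tauto)]
      have hlen : ((c :: t).length : Int) = (t.length : Int) + 1 := by
        push_cast [List.length_cons]; ring
      unfold pvE
      rw [hlen, pv_cstep_shift _ _ _ _ h1, pv_cstep_shift _ _ _ _ h2,
        pv_cstep_shift _ _ _ _ h3, pv_cstep_shift _ _ _ _ h4]
      rw [hs]
      push_cast
      have : pvCStep t (pvCStep t (pvCStep t (pvCStep t (↑t.length) ',') ' ') '}') ')'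
          = pvE t := rfl
      rw [this, ih]

-- B's in-port fold, rewritten to pvE
theorem pv_fold_eq (r : String) :
    [",", " ", "}", ")"].foldl (fun e d =>
        let i := PySem.Str.find r d
        if i ≠ -1 then min e i else e) (PySem.Str.len r)
      = (pvScanEnd r.toList : Int) := by
  rw [← pvE_eq_scanEnd]
  show _ = pvCStep r.toList (pvCStep r.toList (pvCStep r.toList
      (pvCStep r.toList ((r.toList.length : Int)) ',') ' ') '}') ')'
  simp only [List.foldl, pvCStep, PySem.Str.find_eq, PySem.Str.len]
  rfl

theorem pv_find_empty (sub : String) (h : sub.toList ≠ []) :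
    PySem.Str.find "" sub = -1 := by
  have : PySem.Chars.find ([] : List Char) sub.toList = -1 := by
    cases hs : sub.toList with
    | nil => exact absurd hs h
    | cons a l => simp [PySem.Chars.find, PySem.Chars.find.go]
  simpa [PySem.Str.find_eq] using this

-- ===== VERDICT (by name: the statement is the Claim_ definition above) =====
theorem extract_project_from_args_py_spec : Claim_equal_extract_project_from_args_py := by
  intro s _
  unfold Spec_extract_project_from_args_py
  simp only [extract_project_from_args_py, extract_project_from_args_py_alt]
  by_cases hemp : s = ""
  · subst hemp
    rw [if_pos rfl, pv_find_empty "project=" (by decide)]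
    norm_num
  · rw [if_neg hemp]
    have hcase : PySem.Str.find s "project=" = -1 ∨ 0 ≤ PySem.Str.find s "project=" := by
      simpa using pv_find_lb s.toList "project=".toList
    rcases hcase with h1 | h0
    · rw [h1]
      norm_num
    · have hne : ¬ PySem.Str.find s "project=" = -1 := by omega
      have hlt : ¬ PySem.Str.find s "project=" < 0 := by omega
      rw [if_neg hlt, if_neg hne, pv_fold_eq]
      have h8 : PySem.Str.len "project=" = 8 := by decide
      rw [h8]
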